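-- pv_equiv track=rewrite | github.com/PiotrSCerebellum/AdventCalendar2023 | AdventDay6.py | getMarginRaces
-- ===== SOURCE A (Python) =====
-- def getMarginRaces(recordDistance,distance,speed,timeLeft,order):
--         solutions=[]
--         viable=recordDistance>distance
--         while viable:
--             speed=speed+order
--             timeLeft=timeLeft-order
--             recordDistance=speed*timeLeft
--             viable=recordDistance>distance
--             if viable:
--                 solutions.append((speed,recordDistance))
--         if order==-1:
--             solutions.reverse()
--         return solutions
-- ===== SOURCE B (Python) =====
-- def getMarginRaces(recordDistance, distance, speed, timeLeft, order):
--     # Binary search for the last viable step instead of a linear while-loop scan.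
--     if not (recordDistance > distance):
--         return []
--     T = speed + timeLeft
--
--     def beats(k):
--         s = speed + k * order
--         return s * (T - s) > distance
--
--     if not beats(1):
--         return []
--     # beats is downward-closed on k >= 1 (concave quadratic in k), so binary-search
--     # the largest viable k between lo (viable) and hi (not viable).
--     lo = 1
--     hi = abs(speed) + abs(T) + abs(distance) + 2
--     while hi - lo > 1:
--         mid = (lo + hi) // 2
--         if beats(mid):
--             lo = mid
--         else:
--             hi = mid
--     res = [(speed + k * order, (speed + k * order) * (timeLeft - k * order))
--            for k in range(1, lo + 1)]
--     if order == -1: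
--         res.reverse()
--     return res
-- ===== Notes on version B (the rewrite author's own statement) =====
-- stated objective: alternative
-- what changed: Replaces A's linear while-loop scan over successive speeds with a binary search (over the step count, using that the speed*time product is concave) for the last viable step, then builds the (speed, product) list directly from a range.
import Mathlib
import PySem

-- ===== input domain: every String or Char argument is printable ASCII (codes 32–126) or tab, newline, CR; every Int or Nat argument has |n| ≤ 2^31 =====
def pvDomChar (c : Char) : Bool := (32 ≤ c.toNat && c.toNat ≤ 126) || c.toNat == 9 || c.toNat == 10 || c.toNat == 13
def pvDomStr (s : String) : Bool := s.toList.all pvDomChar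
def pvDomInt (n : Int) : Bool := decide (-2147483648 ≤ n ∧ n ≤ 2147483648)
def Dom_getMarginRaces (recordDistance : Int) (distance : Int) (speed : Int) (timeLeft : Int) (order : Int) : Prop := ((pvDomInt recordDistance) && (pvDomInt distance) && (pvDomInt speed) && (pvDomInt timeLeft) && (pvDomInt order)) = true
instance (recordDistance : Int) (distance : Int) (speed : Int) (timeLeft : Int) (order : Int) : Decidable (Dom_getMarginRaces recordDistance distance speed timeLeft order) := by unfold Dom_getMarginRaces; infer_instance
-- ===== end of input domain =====

-- B replaces A's linear while-loop scan over speeds by a binary search for the last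
-- viable step of the concave product, then builds the result list directly (objective: alternative).

-- ===== PORT A =====
-- A's while loop: state (speed, timeLeft), appending (speed, recordDistance) while viable.
-- The `order ≠ 0` conjunct in the guard is a totality guard only: when order = 0 and the
-- product stays above distance the Python loop diverges (excluded by Pre_).
def pvLoopA (fuel : Nat) (distance order speed timeLeft : Int) : List (Int × Int) :=
  match fuel with
  | 0 => []
  | Nat.succ fuel =>
    if (speed + order) * (timeLeft - order) > distance ∧ order ≠ 0 then
      (speed + order, (speed + order) * (timeLeft - order)) ::
        pvLoopA fuel distance order (speed + order) (timeLeft - order)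
    else []

def getMarginRaces (recordDistance : Int) (distance : Int) (speed : Int) (timeLeft : Int) (order : Int) : List (Int × Int) :=
  -- the fuel is a generous bound on the loop's iteration count (totality guard only;
  -- it is never exhausted on inputs satisfying Pre_)
  let solutions := if recordDistance > distance then
      pvLoopA ((|speed| + |speed + timeLeft| + |distance| + 2).toNat + 1) distance order speed timeLeft
    else []
  if order = -1 then solutions.reverse else solutions

-- ===== PORT B =====
-- beats(k) of Source B: does speed+k*order still beat the record?
def pvBeats (distance speed T order k : Int) : Bool :=
  decide ((speed + k * order) * (T - (speed + k * order)) > distance)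

-- the while-loop binary search of Source B (fuel = hi - lo bounds the iteration count)
def pvBSearch (fuel : Nat) (distance speed T order lo hi : Int) : Int :=
  match fuel with
  | 0 => lo
  | Nat.succ fuel =>
    if hi - lo > 1 then
      let mid := PySem.Int.floordiv (lo + hi) 2
      if pvBeats distance speed T order mid then pvBSearch fuel distance speed T order mid hi
      else pvBSearch fuel distance speed T order lo mid
    else lo

def getMarginRaces_alt (recordDistance : Int) (distance : Int) (speed : Int) (timeLeft : Int) (order : Int) : List (Int × Int) :=
  if ¬ (recordDistance > distance) then []
  else
    let T := speed + timeLeft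
    if ¬ (pvBeats distance speed T order 1 = true) then []
    else
      let hi := |speed| + |T| + |distance| + 2
      let lo := pvBSearch (hi - 1).toNat distance speed T order 1 hi
      let res := (PySem.List.pyRange 1 (lo + 1) 1).map
        (fun k => (speed + k * order, (speed + k * order) * (timeLeft - k * order)))
      if order = -1 then res.reverse else res

-- ===== PRECONDITION & SPEC =====
-- Pre_ excludes only the inputs on which Python A loops forever (order = 0 with both the
-- initial guard and the constant product above distance); A returns on everything else.
def Pre_getMarginRaces (recordDistance : Int) (distance : Int) (speed : Int) (timeLeft : Int) (order : Int) : Prop :=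
  ¬ (order = 0 ∧ recordDistance > distance ∧ speed * timeLeft > distance)
instance (recordDistance : Int) (distance : Int) (speed : Int) (timeLeft : Int) (order : Int) : Decidable (Pre_getMarginRaces recordDistance distance speed timeLeft order) := by unfold Pre_getMarginRaces; infer_instance

def pvWitness_getMarginRaces : Int × Int × Int × Int × Int := (1, 0, 1, 2, 1)

def Spec_getMarginRaces (recordDistance : Int) (distance : Int) (speed : Int) (timeLeft : Int) (order : Int) (out : List (Int × Int)) : Prop := out = getMarginRaces_alt recordDistance distance speed timeLeft order
instance (recordDistance : Int) (distance : Int) (speed : Int) (timeLeft : Int) (order : Int) (out : List (Int × Int)) : Decidable (Spec_getMarginRaces recordDistance distance speed timeLeft order out) := by unfold Spec_getMarginRaces; infer_instance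

-- ===== CLAIM (what is proved, stated in full; the proofs are below) =====
def Claim_equal_getMarginRaces : Prop := ∀ (recordDistance : Int) (distance : Int) (speed : Int) (timeLeft : Int) (order : Int), Dom_getMarginRaces recordDistance distance speed timeLeft order → Pre_getMarginRaces recordDistance distance speed timeLeft order → Spec_getMarginRaces recordDistance distance speed timeLeft order (getMarginRaces recordDistance distance speed timeLeft order)

-- ===== LEMMAS AND PROOFS =====

-- abbreviation used throughout: P k ⇔ (s + k*o) * (t - k*o) > d

-- pvBeats with T = s + t is exactly P
theorem pv_beats_iff (d s t o k : Int) :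
    pvBeats d s (s + t) o k = true ↔ (s + k * o) * (t - k * o) > d := by
  simp only [pvBeats, decide_eq_true_iff]
  constructor <;> intro h <;> nlinarith [h]

-- downward closure: P is true on an initial segment (concavity of the product in k)
theorem pv_dc (d s t o k k' : Int) (hk : 1 ≤ k) (hkk : k ≤ k')
    (h1 : (s + 1 * o) * (t - 1 * o) > d)
    (hk' : (s + k' * o) * (t - k' * o) > d) :
    (s + k * o) * (t - k * o) > d := by
  rcases eq_or_lt_of_le hk with h | h
  · rw [← h]; exact h1
  rcases eq_or_lt_of_le hkk with h' | h'
  · rw [h']; exact hk'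
  have hpos : (0:Int) < k' - 1 := by omega
  have key : (s + k * o) * (t - k * o) * (k' - 1) =
      (s + 1 * o) * (t - 1 * o) * (k' - k) + (s + k' * o) * (t - k' * o) * (k - 1)
        + o * o * (k - 1) * (k' - k) * (k' - 1) := by ring
  have h1' : (s + 1 * o) * (t - 1 * o) * (k' - k) ≥ (d + 1) * (k' - k) := by nlinarith
  have h2' : (s + k' * o) * (t - k' * o) * (k - 1) ≥ (d + 1) * (k - 1) := by nlinarith
  have h3' : (0:Int) ≤ o * o * (k - 1) * (k' - k) * (k' - 1) :=
    mul_nonneg (mul_nonneg (mul_nonneg (mul_self_nonneg o) (by omega)) (by omega)) (by omega)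
  have : (s + k * o) * (t - k * o) * (k' - 1) ≥ (d + 1) * (k' - 1) := by
    rw [key]; nlinarith
  nlinarith

-- the search's upper bound is never viable (for order ≠ 0)
theorem pv_top_not_beats (d s t o : Int) (ho : o ≠ 0) :
    ¬ (s + (|s| + |s + t| + |d| + 2) * o) * (t - (|s| + |s + t| + |d| + 2) * o) > d := by
  set K : Int := |s| + |s + t| + |d| + 2 with hK
  have h1 := abs_nonneg s
  have h2 := abs_nonneg (s + t)
  have h3 := abs_nonneg d
  have h4 := le_abs_self s
  have h5 := neg_abs_le s
  have h6 := le_abs_self (s + t)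
  have h7 := neg_abs_le (s + t)
  have h8 := neg_abs_le d
  intro hcon
  rcases lt_or_gt_of_ne ho with hneg | hpos
  · have hKo : K * o ≤ -K := by nlinarith
    have hs : s + K * o ≤ -(|s + t| + |d| + 2) := by omega
    have ht : t - K * o ≥ |d| + 2 := by omega
    have hmul : (s + K * o) * (t - K * o) ≤ -(t - K * o) := by
      nlinarith [mul_nonneg (by omega : (0:Int) ≤ t - K * o)
        (by omega : (0:Int) ≤ -(s + K * o) - 1)]
    linarith
  · have hKo : K * o ≥ K := by nlinarith
    have hs : s + K * o ≥ |s + t| + |d| + 2 := by omega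
    have ht : t - K * o ≤ -(|d| + 2) := by omega
    have hmul : (s + K * o) * (t - K * o) ≤ t - K * o := by
      nlinarith [mul_nonneg (by omega : (0:Int) ≤ s + K * o - 1)
        (by omega : (0:Int) ≤ -(t - K * o))]
    linarith

-- characterisation of A's loop: given P true on [1..n] and false at n+1, the loop
-- started after j steps yields the mapped range (j+1 .. n]
theorem pv_loopA_eq (d s t o : Int) (ho : o ≠ 0) (n : Int) :
    ∀ (fuel : Nat) (j : Int), 0 ≤ j → j ≤ n → n - j < fuel →
    (∀ i : Int, 1 ≤ i → i ≤ n → (s + i * o) * (t - i * o) > d) →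
    ¬ ((s + (n + 1) * o) * (t - (n + 1) * o) > d) →
    pvLoopA fuel d o (s + j * o) (t - j * o) =
      (PySem.List.pyRange (j + 1) (n + 1) 1).map
        (fun k => (s + k * o, (s + k * o) * (t - k * o))) := by
  intro fuel
  induction fuel with
  | zero => intro j hj0 hjn hfuel _ _; exact absurd hfuel (by omega)
  | succ fuel ih =>
    intro j hj0 hjn hfuel hP hn
    rcases eq_or_lt_of_le hjn with hj | hjlt
    · rw [pvLoopA]
      have harg1 : s + j * o + o = s + (n + 1) * o := by rw [hj]; ring
      have harg2 : t - j * o - o = t - (n + 1) * o := by rw [hj]; ring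
      rw [harg1, harg2, if_neg (by tauto)]
      rw [hj, PySem.List.pyRange_one_eq_nil (by omega)]
      simp
    · rw [pvLoopA]
      have harg1 : s + j * o + o = s + (j + 1) * o := by ring
      have harg2 : t - j * o - o = t - (j + 1) * o := by ring
      rw [harg1, harg2, if_pos ⟨hP (j + 1) (by omega) (by omega), ho⟩]
      rw [PySem.List.pyRange_one_cons (by omega : j + 1 < n + 1), List.map_cons]
      refine congrArg (List.cons _) ?_
      exact ih (j + 1) (by omega) (by omega) (by omega) hP hn

-- characterisation of B's binary search
theorem pv_bsearch_eq (d s t o : Int) (n : Int)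
    (hP : ∀ i : Int, 1 ≤ i → i ≤ n → (s + i * o) * (t - i * o) > d)
    (hA : ∀ i : Int, n < i → ¬ ((s + i * o) * (t - i * o) > d)) :
    ∀ (fuel : Nat) (lo hi : Int), 1 ≤ lo → lo ≤ n → n < hi → hi - lo ≤ fuel →
    pvBSearch fuel d s (s + t) o lo hi = n := by
  intro fuel
  induction fuel with
  | zero => intro lo hi hlo1 hlon hnhi hfuel; exact absurd hfuel (by omega)
  | succ fuel ih =>
    intro lo hi hlo1 hlon hnhi hfuel
    rw [pvBSearch]
    by_cases hgt : hi - lo > 1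
    · rw [if_pos hgt]
      have hmid1 : lo + 1 ≤ PySem.Int.floordiv (lo + hi) 2 := by
        rw [PySem.Int.le_floordiv_iff_mul_le (by omega : (0:Int) < 2)]; omega
      have hmid2 : PySem.Int.floordiv (lo + hi) 2 < hi := by
        rw [PySem.Int.floordiv_lt_iff_lt_mul (by omega : (0:Int) < 2)]; omega
      set mid := PySem.Int.floordiv (lo + hi) 2 with hmiddef
      by_cases hb : pvBeats d s (s + t) o mid = true
      · rw [if_pos hb]
        have hPmid : (s + mid * o) * (t - mid * o) > d := (pv_beats_iff d s t o mid).1 hb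
        have hmidn : mid ≤ n := by
          by_contra hc; exact hA mid (by omega) hPmid
        exact ih mid hi (by omega) hmidn hnhi (by omega)
      · rw [if_neg hb]
        have hnmid : n < mid := by
          by_contra hc
          exact hb ((pv_beats_iff d s t o mid).2 (hP mid (by omega) (by omega)))
        exact ih lo mid hlo1 hlon hnmid (by omega)
    · rw [if_neg hgt]
      omega

-- main equivalence
theorem pv_main (recordDistance distance speed timeLeft order : Int)
    (hpre : Pre_getMarginRaces recordDistance distance speed timeLeft order) :
    getMarginRaces recordDistance distance speed timeLeft order =
      getMarginRaces_alt recordDistance distance speed timeLeft order := by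
  unfold getMarginRaces getMarginRaces_alt
  by_cases hrd : recordDistance > distance
  · simp only [if_pos hrd, if_neg (not_not_intro hrd)]
    by_cases hP1 : (speed + 1 * order) * (timeLeft - 1 * order) > distance
    · -- viable first step: order ≠ 0 by Pre_
      have ho : order ≠ 0 := by
        intro h0
        subst h0
        apply hpre
        refine ⟨rfl, hrd, ?_⟩
        nlinarith [hP1]
      have hb1 : pvBeats distance speed (speed + timeLeft) order 1 = true :=
        (pv_beats_iff distance speed timeLeft order 1).2 hP1
      rw [if_neg (not_not_intro hb1)]
      -- find n: the last viable step
      set K : Int := |speed| + |speed + timeLeft| + |distance| + 2 with hK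
      have hKpos : 2 ≤ K := by
        have := abs_nonneg speed; have := abs_nonneg (speed + timeLeft)
        have := abs_nonneg distance; omega
      have hKnot : ¬ ((speed + K * order) * (timeLeft - K * order) > distance) :=
        pv_top_not_beats distance speed timeLeft order ho
      have hex : ∃ m : ℕ, ¬ ((speed + (1 + (m : Int)) * order) * (timeLeft - (1 + (m : Int)) * order) > distance) := by
        refine ⟨(K - 1).toNat, ?_⟩
        have : 1 + ((K - 1).toNat : Int) = K := by omega
        rw [this]; exact hKnot
      set m0 := Nat.find hex with hm0
      have hfind := Nat.find_spec hex
      have hm0pos : 1 ≤ m0 := by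
        rcases Nat.eq_zero_or_pos m0 with h | h
        · exfalso; apply hfind; rw [← hm0] at *; rw [h] at hfind ⊢; push_cast; simpa using hP1
        · exact h
      set n : Int := (m0 : Int) with hn
      have hn1 : 1 ≤ n := by omega
      have hPseg : ∀ i : Int, 1 ≤ i → i ≤ n → (speed + i * order) * (timeLeft - i * order) > distance := by
        intro i hi1 hin
        have hj : ((i - 1).toNat : Int) = i - 1 := by omega
        have hjm : (i - 1).toNat < m0 := by omega
        have := Nat.find_min hex hjm
        push_neg at this
        rw [hj] at this
        have harg : 1 + (i - 1) = i := by ring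
        rw [harg] at this
        omega
      have hnot : ¬ ((speed + (n + 1) * order) * (timeLeft - (n + 1) * order) > distance) := by
        have harg : (1 : Int) + (m0 : Int) = n + 1 := by omega
        rw [harg] at hfind; exact hfind
      have hAbove : ∀ i : Int, n < i → ¬ ((speed + i * order) * (timeLeft - i * order) > distance) := by
        intro i hi hcon
        exact hnot (pv_dc distance speed timeLeft order (n + 1) i (by omega) (by omega) hP1 hcon)
      have hnK : n < K := by
        by_contra hc
        push_neg at hc
        exact hKnot (hPseg K (by omega) hc)
      -- A's side
      have hA : pvLoopA ((|speed| + |speed + timeLeft| + |distance| + 2).toNat + 1) distance order speed timeLeft =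
          (PySem.List.pyRange 1 (n + 1) 1).map
            (fun k => (speed + k * order, (speed + k * order) * (timeLeft - k * order))) := by
        have h0 := pv_loopA_eq distance speed timeLeft order ho n
          ((|speed| + |speed + timeLeft| + |distance| + 2).toNat + 1) 0
          (by omega) (by omega) (by omega) hPseg hnot
        have harg1 : speed + 0 * order = speed := by ring
        have harg2 : timeLeft - 0 * order = timeLeft := by ring
        rw [harg1, harg2] at h0
        simpa using h0
      -- B's side
      have hB : pvBSearch ((K - 1).toNat) distance speed (speed + timeLeft) order 1 K = n :=
        pv_bsearch_eq distance speed timeLeft order n hPseg hAbove (K - 1).toNat 1 K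
          (by omega) hn1 hnK (by omega)
      rw [← hK] at hA
      simp only [hA, hB]
    · -- first step not viable: loop stops immediately, B returns []
      have hb1 : pvBeats distance speed (speed + timeLeft) order 1 = false := by
        rw [← Bool.not_eq_true]
        intro h
        exact hP1 ((pv_beats_iff distance speed timeLeft order 1).1 h)
      rw [show (|speed| + |speed + timeLeft| + |distance| + 2).toNat + 1
            = Nat.succ ((|speed| + |speed + timeLeft| + |distance| + 2).toNat) from rfl,
          pvLoopA]
      have hguard : ¬ ((speed + order) * (timeLeft - order) > distance ∧ order ≠ 0) := by
        intro ⟨h, _⟩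
        apply hP1
        nlinarith [h]
      rw [if_neg hguard]
      simp [hb1]
  · simp only [if_neg hrd, if_pos (by exact hrd : ¬ recordDistance > distance)]
    simp

-- ===== VERDICT (by name: the statement is the Claim_ definition above) =====
theorem getMarginRaces_spec : Claim_equal_getMarginRaces := by
  intro recordDistance distance speed timeLeft order _ hpre
  unfold Spec_getMarginRaces
  exact pv_main recordDistance distance speed timeLeft order hpre
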